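-- pv_equiv track=rewrite | github.com/dperille/2048-expanded | old/2048.py | allLeft
-- ===== SOURCE A (Python) =====
-- def full(arr):
--     for c in range(0, len(arr)):
--         if arr[c] == 0:
--             return False
--     return True
--
-- def allLeft(arr):
--     count = 0
--     for c in range(0, len(arr)):
--         if arr[c] != 0:
--             count = count + 1
--     if full(arr):
--         return True
--     elif firstLeftUnfilled(arr) == count:
--         return True
--     else:
--         return False
--
-- def firstLeftUnfilled(arr):
--     for c in range(0, len(arr)):
--         if arr[c] == 0:
--             return c
--     return -1
-- ===== SOURCE B (Python) =====
-- def allLeft(arr):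
--     seen_zero = False
--     for x in arr:
--         if x == 0:
--             seen_zero = True
--         elif seen_zero:
--             return False
--     return True
-- ===== Notes on version B (the rewrite author's own statement) =====
-- stated objective: simpler
-- what changed: Replaces the three passes (nonzero count, fullness test, first-zero index) and their comparison by a single scan with one seen_zero flag that fails on a nonzero after a zero.
import Mathlib
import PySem

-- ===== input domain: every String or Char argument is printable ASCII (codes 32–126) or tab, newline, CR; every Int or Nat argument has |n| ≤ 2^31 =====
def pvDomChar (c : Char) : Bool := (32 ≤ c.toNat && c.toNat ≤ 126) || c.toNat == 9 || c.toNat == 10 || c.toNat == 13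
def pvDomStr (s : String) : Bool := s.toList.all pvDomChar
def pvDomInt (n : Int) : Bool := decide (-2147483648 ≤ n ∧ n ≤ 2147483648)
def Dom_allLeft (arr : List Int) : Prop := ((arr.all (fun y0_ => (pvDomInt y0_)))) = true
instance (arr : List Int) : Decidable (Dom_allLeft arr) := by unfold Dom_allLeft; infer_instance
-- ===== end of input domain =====

-- B replaces A's three passes (count nonzeros, fullness test, first-zero index) by one
-- scan keeping a single seen_zero flag; objective: simpler.

-- ===== PORT A =====
-- full(arr): scan for a zero
def pvFull : List Int → Bool
  | [] => true
  | x :: xs => if x = 0 then false else pvFull xs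

-- firstLeftUnfilled(arr): index of first zero, else -1 (c is the running loop index)
def pvFirstLU : List Int → Int → Int
  | [], _ => -1
  | x :: xs, c => if x = 0 then c else pvFirstLU xs (c + 1)

def allLeft (arr : List Int) : Bool :=
  let count := arr.foldl (fun c x => if x ≠ 0 then c + 1 else c) (0 : Int)
  if pvFull arr then true
  else if pvFirstLU arr 0 = count then true
  else false

-- ===== PORT B =====
-- single scan with a seen_zero flag; returns false on a nonzero after a zero
def pvScan : List Int → Bool → Bool
  | [], _ => true
  | x :: xs, seen =>
    if x = 0 then pvScan xs true
    else if seen then false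
    else pvScan xs seen

def allLeft_alt (arr : List Int) : Bool := pvScan arr false

-- ===== PRECONDITION & SPEC =====
def Spec_allLeft (arr : List Int) (out : Bool) : Prop := out = allLeft_alt arr
instance (arr : List Int) (out : Bool) : Decidable (Spec_allLeft arr out) := by unfold Spec_allLeft; infer_instance

-- ===== CLAIM (what is proved, stated in full; the proofs are below) =====
def Claim_equal_allLeft : Prop := ∀ (arr : List Int), Dom_allLeft arr → Spec_allLeft arr (allLeft arr)

-- ===== LEMMAS AND PROOFS =====

theorem foldl_count_eq (xs : List Int) (a : Int) :
    xs.foldl (fun c x => if x ≠ 0 then c + 1 else c) a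
      = a + ((xs.filter (fun x => x ≠ 0)).length : Int) := by
  induction xs generalizing a with
  | nil => simp
  | cons x xs ih =>
    rw [List.foldl_cons, List.filter_cons]
    by_cases hx : x = 0
    · have h1 : decide (x ≠ 0) = false := by simp [hx]
      rw [if_neg (fun h => h hx), ih, h1]
      simp
    · have h1 : decide (x ≠ 0) = true := by simp [hx]
      rw [if_pos hx, ih, h1]
      simp only [if_true, List.length_cons]
      push_cast
      ring

theorem scan_true_eq (xs : List Int) :
    pvScan xs true = xs.all (fun x => x == 0) := by
  induction xs with
  | nil => rfl
  | cons x xs ih =>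
    by_cases hx : x = 0 <;> simp [pvScan, hx, ih]

theorem full_scan (xs : List Int) (h : pvFull xs = true) : pvScan xs false = true := by
  induction xs with
  | nil => rfl
  | cons x xs ih =>
    by_cases hx : x = 0
    · simp [pvFull, hx] at h
    · simp [pvFull, hx] at h
      simp [pvScan, hx, ih h]

theorem key_lemma (xs : List Int) (a : Int) (h : pvFull xs = false) :
    (pvFirstLU xs a = xs.foldl (fun c x => if x ≠ 0 then c + 1 else c) a)
      ↔ pvScan xs false = true := by
  induction xs generalizing a with
  | nil => simp [pvFull] at h
  | cons x xs ih =>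
    by_cases hx : x = 0
    · have hfl : pvFirstLU (x :: xs) a = a := by simp [pvFirstLU, hx]
      have hstep : (x :: xs).foldl (fun c x => if x ≠ 0 then c + 1 else c) a
          = xs.foldl (fun c x => if x ≠ 0 then c + 1 else c) a := by
        simp [List.foldl, hx]
      have hscan : pvScan (x :: xs) false = xs.all (fun y => y == 0) := by
        simp [pvScan, hx, scan_true_eq]
      rw [hfl, hstep, foldl_count_eq, hscan]
      constructor
      · intro he
        have hlen : (xs.filter (fun x => x ≠ 0)).length = 0 := by omega
        rw [List.length_eq_zero_iff] at hlen
        simp only [List.all_eq_true, beq_iff_eq]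
        intro y hy
        have := List.filter_eq_nil_iff.mp hlen y hy
        simpa using this
      · intro hall
        have hnil : xs.filter (fun x => x ≠ 0) = [] := by
          rw [List.filter_eq_nil_iff]
          intro y hy
          simp only [List.all_eq_true, beq_iff_eq] at hall
          simpa using hall y hy
        rw [hnil]
        simp
    · have h' : pvFull xs = false := by simpa [pvFull, hx] using h
      have := ih (a + 1) h'
      simpa [pvFirstLU, pvScan, hx, List.foldl] using this

-- ===== VERDICT (by name: the statement is the Claim_ definition above) =====
theorem allLeft_spec : Claim_equal_allLeft := by
  intro arr _
  show allLeft arr = allLeft_alt arr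
  simp only [allLeft, allLeft_alt]
  by_cases hf : pvFull arr = true
  · rw [if_pos hf]
    exact (full_scan arr hf).symm
  · have hf' : pvFull arr = false := by
      cases h : pvFull arr
      · rfl
      · exact absurd h hf
    rw [if_neg hf]
    by_cases he : pvFirstLU arr 0
        = List.foldl (fun c x => if x ≠ 0 then c + 1 else c) 0 arr
    · rw [if_pos he]
      exact ((key_lemma arr 0 hf').mp he).symm
    · rw [if_neg he]
      cases h : pvScan arr false
      · rfl
      · exact absurd ((key_lemma arr 0 hf').mpr h) he
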